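-- pv_equiv track=rewrite | github.com/SaurabhJha19/GolMaal-MONEY-MULING-DETECTION-CHALLENGE-RIFT26 | backend/app/patterns/cycle_detector.py | _merge_overlapping_cycles
-- ===== SOURCE A (Python) =====
-- from typing import List, Set, Dict
--
-- def _merge_overlapping_cycles(cycles: List[Set[str]]) -> List[Set[str]]:
--     """
--     Merge cycles that share at least one node into a single ring.
--     """
--     merged = []
--
--     for cycle in cycles:
--         merged_into_existing = False
--
--         for ring in merged:
--             if not cycle.isdisjoint(ring):
--                 ring.update(cycle)
--                 merged_into_existing = True
--                 break
--
--         if not merged_into_existing: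
--             merged.append(set(cycle))
--
--     # One more pass to ensure full merging
--     final_merged = []
--     while merged:
--         first = merged.pop(0)
--         changed = True
--         while changed:
--             changed = False
--             for other in merged[:]:
--                 if not first.isdisjoint(other):
--                     first.update(other)
--                     merged.remove(other)
--                     changed = True
--         final_merged.append(first)
--
--     return final_merged
-- ===== SOURCE B (Python) =====
-- from typing import List, Set
--
-- def _merge_overlapping_cycles(cycles: List[Set[str]]) -> List[Set[str]]:
--     """
--     Merge cycles that share at least one node into a single ring.
--     Same result as the scanning version, but the first phase locates the
--     target ring through a node -> first-ring-index dictionary instead of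
--     scanning every existing ring, and the second phase rebuilds the pending
--     list functionally instead of mutating it in place.
--     """
--     rings: List[Set[str]] = []
--     first_ring = {}  # node -> index of the first (lowest) ring containing it
--     for cycle in cycles:
--         hits = [first_ring[n] for n in cycle if n in first_ring]
--         if hits:
--             i = min(hits)
--             rings[i].update(cycle)
--         else:
--             i = len(rings)
--             rings.append(set(cycle))
--         for n in cycle:
--             first_ring[n] = i
--
--     final = []
--     rest = rings
--     while rest:
--         acc, rest = rest[0], rest[1:]
--         changed = True
--         while changed:
--             changed = False
--             kept = []
--             for other in rest:
--                 if acc.isdisjoint(other):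
--                     kept.append(other)
--                 else:
--                     acc.update(other)
--                     changed = True
--             rest = kept
--         final.append(acc)
--     return final
-- ===== Notes on version B (the rewrite author's own statement) =====
-- stated objective: alternative
-- what changed: Phase 1 locates the target ring through a node-to-first-ring-index dictionary (one lookup per node) instead of scanning every existing ring per cycle, and phase 2 rebuilds the pending list functionally (a kept-list per round) instead of mutating it in place with copy/remove; measured running time is not better, so no speed is claimed.
import Mathlib
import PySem

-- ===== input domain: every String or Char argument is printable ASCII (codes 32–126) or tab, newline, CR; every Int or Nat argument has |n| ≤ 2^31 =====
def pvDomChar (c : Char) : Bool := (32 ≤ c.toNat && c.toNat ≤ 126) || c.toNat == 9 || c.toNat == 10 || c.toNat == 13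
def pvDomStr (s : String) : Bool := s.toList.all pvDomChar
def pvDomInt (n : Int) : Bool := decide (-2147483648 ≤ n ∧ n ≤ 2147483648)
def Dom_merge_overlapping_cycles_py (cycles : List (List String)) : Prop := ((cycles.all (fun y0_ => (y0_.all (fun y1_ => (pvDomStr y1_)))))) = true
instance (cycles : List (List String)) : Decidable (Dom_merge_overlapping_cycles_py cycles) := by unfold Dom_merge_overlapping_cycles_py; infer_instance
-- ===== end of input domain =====

-- B replaces A's first-phase inner scan over all rings by a node → first-ring-index
-- dictionary and rebuilds the pending list functionally in the second phase (alternative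
-- decomposition; equality of the returned value is proved below).

-- ===== PORT A =====
-- inner loop of phase 1: `for ring in merged: if not cycle.isdisjoint(ring): ring.update(cycle); break`
-- (returns the new list and the `merged_into_existing` flag)
def pvP1Loop (cycle : List String) : List (List String) → List (List String) × Bool
  | [] => ([], false)
  | r :: rs =>
    if PySem.Set.isdisjoint cycle r = false then (PySem.Set.update r cycle :: rs, true)
    else
      let p := pvP1Loop cycle rs
      (r :: p.1, p.2)

-- body of `for cycle in cycles`
def pvP1Step (merged : List (List String)) (cycle : List String) : List (List String) :=
  let p := pvP1Loop cycle merged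
  if p.2 then p.1 else p.1 ++ [PySem.Set.ofList cycle]

-- `for other in merged[:]: if not first.isdisjoint(other): first.update(other); merged.remove(other); changed = True`
-- (`merged.remove` never raises here: `other` is always still present; `.getD merged` is the unreachable branch)
def pvScanA (first : List String) (merged : List (List String)) (changed : Bool) :
    List (List String) → List String × List (List String) × Bool
  | [] => (first, merged, changed)
  | o :: os =>
    if PySem.Set.isdisjoint first o = false then
      pvScanA (PySem.Set.update first o) ((PySem.List.remove? merged o).getD merged) true os
    else pvScanA first merged changed os

-- `while changed:` — every changed round removes at least one element, so length + 1 rounds suffice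
def pvWhileA : Nat → List String → List (List String) → List String × List (List String)
  | 0, first, merged => (first, merged)
  | fuel + 1, first, merged =>
    let r := pvScanA first merged false merged
    if r.2.2 then pvWhileA fuel r.1 r.2.1 else (r.1, r.2.1)

-- `while merged: first = merged.pop(0); …` — every iteration consumes at least one element
def pvOuterA : Nat → List (List String) → List (List String)
  | 0, _ => []
  | _ + 1, [] => []
  | fuel + 1, first :: rest =>
    let r := pvWhileA (rest.length + 1) first rest
    r.1 :: pvOuterA fuel r.2

def merge_overlapping_cycles_py (cycles : List (List String)) : List (List String) :=
  let merged := cycles.foldl pvP1Step []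
  pvOuterA merged.length merged

-- ===== PORT B =====
-- body of B's first loop: hits = [first_ring[n] for n in cycle if n in first_ring]; …
-- (`rings[i]` is always in range, so `pyGetD … []` / `pySetD` take their in-range branch)
def pvB1Step (st : List (List String) × PySem.Dict String Int) (cycle : List String) :
    List (List String) × PySem.Dict String Int :=
  let hits := cycle.filterMap (fun n => st.2.get? n)
  let p : List (List String) × Int :=
    match PySem.List.min? hits (fun x => x) with
    | some i =>
      (PySem.List.pySetD st.1 i (PySem.Set.update (PySem.List.pyGetD st.1 i []) cycle), i)
    | none => (st.1 ++ [PySem.Set.ofList cycle], (st.1.length : Int))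
  (p.1, cycle.foldl (fun d n => d.insert n p.2) st.2)

-- `for other in rest: if acc.isdisjoint(other): kept.append(other) else: acc.update(other); changed = True`
def pvScanB (acc : List String) (changed : Bool) (kept : List (List String)) :
    List (List String) → List String × List (List String) × Bool
  | [] => (acc, kept, changed)
  | o :: os =>
    if PySem.Set.isdisjoint acc o = false then pvScanB (PySem.Set.update acc o) true kept os
    else pvScanB acc changed (kept ++ [o]) os

def pvWhileB : Nat → List String → List (List String) → List String × List (List String)
  | 0, acc, rest => (acc, rest)
  | fuel + 1, acc, rest =>
    let r := pvScanB acc false [] rest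
    if r.2.2 then pvWhileB fuel r.1 r.2.1 else (r.1, r.2.1)

def pvOuterB : Nat → List (List String) → List (List String)
  | 0, _ => []
  | _ + 1, [] => []
  | fuel + 1, acc :: rest =>
    let r := pvWhileB (rest.length + 1) acc rest
    r.1 :: pvOuterB fuel r.2

def merge_overlapping_cycles_py_alt (cycles : List (List String)) : List (List String) :=
  let st := cycles.foldl pvB1Step ([], PySem.Dict.empty)
  pvOuterB st.1.length st.1

-- ===== PRECONDITION & SPEC =====
def Spec_merge_overlapping_cycles_py (cycles : List (List String)) (out : List (List String)) : Prop := out = merge_overlapping_cycles_py_alt cycles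
instance (cycles : List (List String)) (out : List (List String)) : Decidable (Spec_merge_overlapping_cycles_py cycles out) := by unfold Spec_merge_overlapping_cycles_py; infer_instance

-- ===== CLAIM (what is proved, stated in full; the proofs are below) =====
def Claim_equal_merge_overlapping_cycles_py : Prop := ∀ (cycles : List (List String)), Dom_merge_overlapping_cycles_py cycles → Spec_merge_overlapping_cycles_py cycles (merge_overlapping_cycles_py cycles)

-- ===== LEMMAS AND PROOFS =====

-- `pvQ l`: a nonempty earlier ring always keeps an element missing from every later ring
def pvQ (l : List (List String)) : Prop :=
  l.Pairwise (fun a b => a ≠ [] → ∃ x ∈ a, x ∉ b)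

-- `pvP l`: two equal rings in the list can only be the empty ring
def pvP (l : List (List String)) : Prop :=
  l.Pairwise (fun a b => a = b → b = [])

-- index of the first ring containing a node
def pvFirstIdx (rings : List (List String)) (n : String) : Option Nat :=
  rings.findIdx? (fun r => n ∈ r)

-- the dictionary maps every node to the index of the first ring containing it
def pvInv (rings : List (List String)) (d : PySem.Dict String Int) : Prop :=
  ∀ n, d.get? n = (pvFirstIdx rings n).map (fun j => (j : Int))

theorem pv_remove_middle {o : List String} (kept os : List (List String)) (h : o ∉ kept) :
    PySem.List.remove? (kept ++ o :: os) o = some (kept ++ os) := by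
  induction kept with
  | nil => simp [PySem.List.remove?_cons_self]
  | cons a t ih =>
    have ha : a ≠ o := by intro e; exact h (e ▸ List.mem_cons_self)
    have ht : o ∉ t := fun m => h (List.mem_cons_of_mem _ m)
    simp [PySem.List.remove?_cons_of_ne _ ha, ih ht]

theorem pv_nonempty_of_not_disjoint {f o : List String}
    (h : PySem.Set.isdisjoint f o = false) : o ≠ [] := by
  intro e; subst e
  have : PySem.Set.isdisjoint f ([] : List String) = true := by
    rw [PySem.Set.isdisjoint_iff]; intro x _ hx; simp at hx
  simp [this] at h

theorem pv_scan_eq (os : List (List String)) : ∀ (first : List String) (changed : Bool)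
    (kept : List (List String)), pvP (kept ++ os) →
    pvScanA first (kept ++ os) changed os = pvScanB first changed kept os := by
  induction os with
  | nil => intro first changed kept _; simp [pvScanA, pvScanB]
  | cons o os ih =>
    intro first changed kept hp
    by_cases hd : PySem.Set.isdisjoint first o = false
    · have hne : o ≠ [] := pv_nonempty_of_not_disjoint hd
      have hnk : o ∉ kept := by
        rcases List.pairwise_append.mp hp with ⟨_, _, hrel⟩
        intro m
        exact hne (hrel o m o List.mem_cons_self rfl)
      have hp' : pvP (kept ++ os) := by
        refine List.Pairwise.sublist ?_ hp
        exact (List.sublist_cons_self o os).append_left kept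
      simp only [pvScanA, pvScanB, hd, pv_remove_middle kept os hnk, Option.getD_some]
      exact ih _ _ _ hp'
    · have hp' : pvP ((kept ++ [o]) ++ os) := by
        rw [List.append_assoc]; simpa using hp
      simp only [pvScanA, pvScanB, hd]
      have := ih first changed (kept ++ [o]) hp'
      rw [List.append_assoc] at this
      simpa using this

theorem pv_scanB_sublist (os : List (List String)) : ∀ (acc : List String) (changed : Bool)
    (kept : List (List String)),
    ∃ k, (pvScanB acc changed kept os).2.1 = kept ++ k ∧ k.Sublist os := by
  induction os with
  | nil => intro acc changed kept; exact ⟨[], by simp [pvScanB], List.nil_sublist _⟩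
  | cons o os ih =>
    intro acc changed kept
    by_cases hd : PySem.Set.isdisjoint acc o = false
    · obtain ⟨k, hk, hs⟩ := ih (PySem.Set.update acc o) true kept
      exact ⟨k, by simp [pvScanB, hd, hk], hs.cons o⟩
    · obtain ⟨k, hk, hs⟩ := ih acc changed (kept ++ [o])
      refine ⟨o :: k, ?_, hs.cons₂ o⟩
      simp [pvScanB, hd, hk]

theorem pv_while_eq (fuel : Nat) : ∀ (first : List String) (merged : List (List String)),
    pvP merged →
    pvWhileA fuel first merged = pvWhileB fuel first merged ∧
      (pvWhileB fuel first merged).2.Sublist merged := by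
  induction fuel with
  | zero => intro first merged _; exact ⟨rfl, List.Sublist.refl _⟩
  | succ fuel ih =>
    intro first merged hp
    have hs := pv_scan_eq merged first false [] (by simpa using hp)
    simp only [List.nil_append] at hs
    obtain ⟨k, hk, hsub⟩ := pv_scanB_sublist merged first false []
    simp only [List.nil_append] at hk
    simp only [pvWhileA, pvWhileB, hs]
    set r := pvScanB first false [] merged with hr
    by_cases hc : r.2.2
    · simp only [hc]
      have hp' : pvP r.2.1 := by rw [hk]; exact hp.sublist hsub
      obtain ⟨he, hsb⟩ := ih r.1 r.2.1 hp'
      exact ⟨he, hsb.trans (by rw [hk]; exact hsub)⟩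
    · simp only [hc]
      exact ⟨rfl, by simp; rw [hk]; exact hsub⟩

theorem pv_outer_eq (fuel : Nat) : ∀ (merged : List (List String)), pvP merged →
    pvOuterA fuel merged = pvOuterB fuel merged := by
  induction fuel with
  | zero => intro merged _; rfl
  | succ fuel ih =>
    intro merged hp
    match merged with
    | [] => rfl
    | first :: rest =>
      have hpr : pvP rest := hp.of_cons
      obtain ⟨he, hsb⟩ := pv_while_eq (rest.length + 1) first rest hpr
      simp only [pvOuterA, pvOuterB, he]
      exact congrArg _ (ih _ (hpr.sublist hsb))

-- L1: no ring intersects the cycle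
theorem pvP1Loop_none (cycle : List String) (merged : List (List String))
    (h : ∀ r ∈ merged, PySem.Set.isdisjoint cycle r = true) :
    pvP1Loop cycle merged = (merged, false) := by
  induction merged with
  | nil => rfl
  | cons r rs ih =>
    have hr := h r List.mem_cons_self
    simp [pvP1Loop, hr, ih (fun x hx => h x (List.mem_cons_of_mem _ hx))]

-- L2: first intersecting ring is at index j
theorem pvP1Loop_hit (cycle : List String) : ∀ (merged : List (List String)) (j : Nat)
    (hj : j < merged.length),
    (∀ k (hk : k < j), PySem.Set.isdisjoint cycle (merged[k]'(by omega)) = true) →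
    PySem.Set.isdisjoint cycle merged[j] = false →
    pvP1Loop cycle merged = (merged.set j (PySem.Set.update merged[j] cycle), true) := by
  intro merged
  induction merged with
  | nil => intro j hj; simp at hj
  | cons r rs ih =>
    intro j hj hbefore hhit
    match j with
    | 0 => simp_all [pvP1Loop]
    | j' + 1 =>
      have hr : PySem.Set.isdisjoint cycle r = true := hbefore 0 (by omega)
      have := ih j' (by simpa using hj)
        (fun k hk => by simpa using hbefore (k+1) (by omega))
        (by simpa using hhit)
      simp [pvP1Loop, hr, this]

-- L3: dict after the for-loop of inserts
theorem pv_get?_foldl_insert (cycle : List String) : ∀ (d : PySem.Dict String Int) (i : Int)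
    (m : String),
    (cycle.foldl (fun d n => d.insert n i) d).get? m = if m ∈ cycle then some i else d.get? m := by
  induction cycle with
  | nil => intro d i m; simp
  | cons c cs ih =>
    intro d i m
    simp only [List.foldl_cons, ih]
    by_cases hm : m ∈ cs
    · simp [hm]
    · simp only [hm, if_false, PySem.Dict.get?_insert]
      by_cases he : m = c <;> simp [he, hm]

-- L4: setting position j with a ring containing the same nodes keeps pvFirstIdx
theorem pv_firstIdx_set (n : String) : ∀ (rings : List (List String)) (j : Nat) (r' : List String)
    (hj : j < rings.length), ((n ∈ r') ↔ (n ∈ rings[j])) →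
    pvFirstIdx (rings.set j r') n = pvFirstIdx rings n := by
  intro rings
  induction rings with
  | nil => intro j r' hj; simp at hj
  | cons r rs ih =>
    intro j r' hj hiff
    match j with
    | 0 =>
      simp only [List.getElem_cons_zero] at hiff
      simp only [List.set_cons_zero, pvFirstIdx, List.findIdx?_cons]
      by_cases hn : n ∈ r
      · simp [hn, hiff.mpr hn]
      · have : n ∉ r' := fun h => hn (hiff.mp h)
        simp [hn, this]
    | j' + 1 =>
      simp only [List.set_cons_succ, pvFirstIdx, List.findIdx?_cons]
      by_cases hn : n ∈ r
      · simp [hn]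
      · simpa [hn] using congrArg (Option.map (· + 1)) (ih j' r' (by simpa using hj) (by simpa using hiff))

-- main step lemma, phase 1
theorem pvStep_eq (rings : List (List String)) (d : PySem.Dict String Int) (cycle : List String)
    (hinv : pvInv rings d) (hq : pvQ rings) :
    pvP1Step rings cycle = (pvB1Step (rings, d) cycle).1 ∧
      pvInv (pvB1Step (rings, d) cycle).1 (pvB1Step (rings, d) cycle).2 ∧
      pvQ (pvP1Step rings cycle) := by
  rcases hmin : PySem.List.min? (cycle.filterMap (fun n => d.get? n)) (fun x => x) with _ | i
  · -- no node of the cycle is in any ring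
    have hnil : cycle.filterMap (fun n => d.get? n) = [] :=
      (PySem.List.min?_eq_none_iff _ _).mp hmin
    have hnone : ∀ n ∈ cycle, pvFirstIdx rings n = none := by
      intro n hn
      have := List.filterMap_eq_nil_iff.mp hnil n hn
      rw [hinv n] at this
      rcases h : pvFirstIdx rings n with _ | j
      · rfl
      · rw [h] at this; simp at this
    have hnotin : ∀ n ∈ cycle, ∀ r ∈ rings, n ∉ r := by
      intro n hn r hr
      have := List.findIdx?_eq_none_iff.mp (hnone n hn) r hr
      simpa using this
    have hdisj : ∀ r ∈ rings, PySem.Set.isdisjoint cycle r = true := by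
      intro r hr
      rw [PySem.Set.isdisjoint_iff]
      exact fun x hx => hnotin x hx r hr
    have hloop := pvP1Loop_none cycle rings hdisj
    have hA : pvP1Step rings cycle = rings ++ [PySem.Set.ofList cycle] := by
      simp [pvP1Step, hloop]
    have hB1 : (pvB1Step (rings, d) cycle).1 = rings ++ [PySem.Set.ofList cycle] := by
      simp [pvB1Step, hmin]
    refine ⟨by rw [hA, hB1], ?_, ?_⟩
    · -- invariant for the new state
      intro m
      have hB2 : (pvB1Step (rings, d) cycle).2 =
          cycle.foldl (fun d n => d.insert n (rings.length : Int)) d := by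
        simp [pvB1Step, hmin]
      rw [hB2, hB1, pv_get?_foldl_insert]
      by_cases hm : m ∈ cycle
      · have h1 : pvFirstIdx (rings ++ [PySem.Set.ofList cycle]) m = some rings.length := by
          unfold pvFirstIdx
          rw [List.findIdx?_append]
          have : List.findIdx? (fun r => decide (m ∈ r)) rings = none := hnone m hm
          simp [this, PySem.Set.mem_ofList, hm]
        simp [hm, h1]
      · have h1 : pvFirstIdx (rings ++ [PySem.Set.ofList cycle]) m = pvFirstIdx rings m := by
          unfold pvFirstIdx
          rw [List.findIdx?_append]
          have : m ∉ PySem.Set.ofList cycle := fun h => hm ((PySem.Set.mem_ofList _ _).mp h)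
          rcases h : List.findIdx? (fun r => decide (m ∈ r)) rings with _ | j
          · simp [this]
          · simp
        simp [hm, h1, hinv m]
    · -- pvQ preserved
      rw [hA]
      rw [pvQ, List.pairwise_append]
      refine ⟨hq, by simp, ?_⟩
      intro a ha b hb hane
      obtain ⟨x, hx⟩ := List.exists_mem_of_ne_nil a hane
      refine ⟨x, hx, ?_⟩
      simp only [List.mem_singleton] at hb
      subst hb
      rw [PySem.Set.mem_ofList]
      exact fun hxc => hnotin x hxc a ha hx
  · -- some node of the cycle is already in a ring; i is the least first-ring index
    have hmem := PySem.List.min?_mem hmin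
    obtain ⟨n0, hn0c, hn0d⟩ := List.mem_filterMap.mp hmem
    rw [hinv n0] at hn0d
    rcases hfi : pvFirstIdx rings n0 with _ | j0
    · rw [hfi] at hn0d; simp at hn0d
    rw [hfi] at hn0d
    have hij : i = (j0 : Int) := by simpa using hn0d.symm
    obtain ⟨hj0len, hpred0, hfirst0⟩ := List.findIdx?_eq_some_iff_getElem.mp hfi
    have hn0r : n0 ∈ rings[j0] := by simpa using hpred0
    have hile : ∀ y ∈ cycle.filterMap (fun n => d.get? n), i ≤ y :=
      fun y hy => PySem.List.min?_isMin hmin y hy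
    have hbefore : ∀ k (hk : k < j0), PySem.Set.isdisjoint cycle (rings[k]'(by omega)) = true := by
      intro k hk
      rw [PySem.Set.isdisjoint_iff]
      intro x hx hxk
      rcases hgx : pvFirstIdx rings x with _ | j'
      · have := List.findIdx?_eq_none_iff.mp hgx (rings[k]'(by omega)) (rings.getElem_mem _)
        simp [hxk] at this
      · obtain ⟨hj'len, hpred', hfirst'⟩ := List.findIdx?_eq_some_iff_getElem.mp hgx
        have hj'k : j' ≤ k := by
          by_contra hgt
          exact hfirst' k (by omega) (by simp [hxk])
        have : (j' : Int) ∈ cycle.filterMap (fun n => d.get? n) :=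
          List.mem_filterMap.mpr ⟨x, hx, by rw [hinv x, hgx]; rfl⟩
        have := hile _ this
        rw [hij] at this
        omega
    have hhit : PySem.Set.isdisjoint cycle rings[j0] = false := by
      cases h : PySem.Set.isdisjoint cycle rings[j0]
      · rfl
      · exact absurd ((PySem.Set.isdisjoint_iff _ _).mp h n0 hn0c) (by simp [hn0r])
    have hloop := pvP1Loop_hit cycle rings j0 hj0len hbefore hhit
    have hA : pvP1Step rings cycle =
        rings.set j0 (PySem.Set.update rings[j0] cycle) := by
      simp [pvP1Step, hloop]
    have hB1 : (pvB1Step (rings, d) cycle).1 =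
        rings.set j0 (PySem.Set.update rings[j0] cycle) := by
      simp only [pvB1Step, hmin]
      rw [hij]
      rw [PySem.List.pySetD_of_nonneg _ _ (by positivity),
          PySem.List.pyGetD_of_nonneg _ _ (by positivity)]
      rw [Int.toNat_natCast, List.getD_eq_getElem _ _ hj0len]
    refine ⟨by rw [hA, hB1], ?_, ?_⟩
    · -- invariant for the new state
      intro m
      have hB2 : (pvB1Step (rings, d) cycle).2 =
          cycle.foldl (fun d n => d.insert n i) d := by
        simp [pvB1Step, hmin]
      rw [hB2, hB1, pv_get?_foldl_insert]
      by_cases hm : m ∈ cycle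
      · have h1 : pvFirstIdx (rings.set j0 (PySem.Set.update rings[j0] cycle)) m = some j0 := by
          apply List.findIdx?_eq_some_iff_getElem.mpr
          refine ⟨by simpa using hj0len, ?_, ?_⟩
          · rw [List.getElem_set, if_pos rfl]
            exact decide_eq_true ((PySem.Set.mem_update _ _ _).mpr (Or.inr hm))
          · intro l hl
            rw [List.getElem_set, if_neg (by omega)]
            have : m ∉ rings[l]'(by omega) :=
              (PySem.Set.isdisjoint_iff _ _).mp (hbefore l hl) m hm
            simp [this]
        simp [hm, h1, hij]
      · have h1 : pvFirstIdx (rings.set j0 (PySem.Set.update rings[j0] cycle)) m =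
            pvFirstIdx rings m := by
          apply pv_firstIdx_set m rings j0 _ hj0len
          rw [PySem.Set.mem_update]
          simp [hm]
        simp [hm, h1, hinv m]
    · -- pvQ preserved
      rw [hA, pvQ, List.pairwise_iff_getElem]
      intro a b ha hb hab
      have hq' := List.pairwise_iff_getElem.mp hq
      have ha' : a < rings.length := by simpa using ha
      have hb' : b < rings.length := by simpa using hb
      rw [List.getElem_set, List.getElem_set]
      by_cases haj : j0 = a
      · subst haj
        have hbj : ¬ (j0 = b) := by omega
        rw [if_pos rfl, if_neg hbj]
        intro _
        obtain ⟨x, hxr, hxb⟩ := hq' j0 b hj0len hb' hab (by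
          intro e; rw [e] at hn0r; simp at hn0r)
        exact ⟨x, by rw [PySem.Set.mem_update]; exact Or.inl hxr, hxb⟩
      · by_cases hbj : j0 = b
        · subst hbj
          rw [if_neg haj, if_pos rfl]
          intro hane
          obtain ⟨x, hxa, hxj⟩ := hq' a j0 ha' hj0len hab hane
          refine ⟨x, hxa, ?_⟩
          rw [PySem.Set.mem_update]
          rintro (h | h)
          · exact hxj h
          · exact (PySem.Set.isdisjoint_iff _ _).mp (hbefore a hab) x h hxa
        · rw [if_neg haj, if_neg hbj]
          exact hq' a b ha' hb' hab

theorem pv_phase1_eq (cycles : List (List String)) : ∀ (rings : List (List String))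
    (d : PySem.Dict String Int), pvInv rings d → pvQ rings →
    cycles.foldl pvP1Step rings = (cycles.foldl pvB1Step (rings, d)).1 ∧
      pvQ (cycles.foldl pvP1Step rings) := by
  induction cycles with
  | nil => intro rings d _ hq; exact ⟨rfl, hq⟩
  | cons c cs ih =>
    intro rings d hinv hq
    obtain ⟨hAB, hinv', hq'⟩ := pvStep_eq rings d c hinv hq
    simp only [List.foldl_cons]
    have := ih (pvB1Step (rings, d) c).1 (pvB1Step (rings, d) c).2 hinv' (hAB ▸ hq')
    rw [hAB]
    simpa using this

theorem pvP_of_pvQ (l : List (List String)) (h : pvQ l) : pvP l := by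
  refine h.imp ?_
  intro a b hr hab
  by_contra hb
  obtain ⟨x, hxa, hxb⟩ := hr (by rw [hab]; exact hb)
  exact hxb (hab ▸ hxa)

-- ===== VERDICT (by name: the statement is the Claim_ definition above) =====
theorem merge_overlapping_cycles_py_spec : Claim_equal_merge_overlapping_cycles_py := by
  intro cycles _
  unfold Spec_merge_overlapping_cycles_py merge_overlapping_cycles_py merge_overlapping_cycles_py_alt
  obtain ⟨he, hq⟩ := pv_phase1_eq cycles [] PySem.Dict.empty (fun n => rfl) List.Pairwise.nil
  show pvOuterA _ _ = pvOuterB _ _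
  rw [← he]
  exact pv_outer_eq _ _ (pvP_of_pvQ _ hq)
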